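-- pv_equiv track=rewrite | github.com/TarangGarlapally/my_algos | longest_interval_after_merging_using_stack.py | solve
-- ===== SOURCE A (Python) =====
-- def solve(intervals):
--     intervals.sort(key = lambda x: x[0])
--     stack = []
--     stack.append(intervals[0])
--
--     i = 0
--     for i in range(len(intervals)):
--         if(intervals[i][0]<=stack[-1][1]) and stack[-1][1]>intervals[i][1]:
--             pass
--         elif(stack[-1][1]>=intervals[i][0]):
--             temp = [stack[-1][0],intervals[i][1]]
--             stack.pop()
--             stack.append(temp)
--         else:
--             stack.append(intervals[i])
--         i+=1
--
--
--     r = 0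
--     for x in stack:
--         if(x[1]-x[0] +1>r):
--             r = x[1]-x[0] +1
--     return r
-- ===== SOURCE B (Python) =====
-- def _merge(left, right):
--     # merge two span lists: the last left span may absorb a chain of right spans
--     if not left:
--         return right
--     s, e = left[-1]
--     k = 0
--     while k < len(right) and right[k][0] <= e:
--         e = max(e, right[k][1])
--         k += 1
--     return left[:-1] + [(s, e)] + right[k:]
--
-- def _spans(ivs):
--     # divide and conquer: span lists of the two halves, merged at the junction
--     if not ivs:
--         return []
--     if len(ivs) == 1:
--         return [(ivs[0][0], ivs[0][1])]
--     mid = len(ivs) // 2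
--     return _merge(_spans(ivs[:mid]), _spans(ivs[mid:]))
--
-- def solve(intervals):
--     intervals.sort(key=lambda x: x[0])
--     best = 0
--     for s, e in _spans(intervals):
--         best = max(best, e - s + 1)
--     return best
-- ===== Notes on version B (the rewrite author's own statement) =====
-- stated objective: alternative
-- what changed: B replaces A's linear greedy stack pass by divide and conquer: it recursively splits the sorted list, computes the merged span list of each half, and merges the two span lists at the junction (the last left span absorbing a chain of right spans), then takes the max span length.
import Mathlib
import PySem

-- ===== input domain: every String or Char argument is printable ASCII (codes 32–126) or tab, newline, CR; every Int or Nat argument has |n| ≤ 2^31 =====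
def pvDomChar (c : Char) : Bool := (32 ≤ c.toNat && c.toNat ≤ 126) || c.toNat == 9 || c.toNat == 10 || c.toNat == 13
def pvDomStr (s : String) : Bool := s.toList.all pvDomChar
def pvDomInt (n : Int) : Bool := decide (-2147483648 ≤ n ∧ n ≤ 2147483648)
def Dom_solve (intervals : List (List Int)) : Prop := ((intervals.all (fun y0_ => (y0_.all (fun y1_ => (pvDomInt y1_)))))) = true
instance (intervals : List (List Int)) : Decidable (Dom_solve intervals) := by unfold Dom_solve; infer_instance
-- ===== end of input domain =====

-- B computes the merged spans by divide and conquer (split, recurse, merge the two span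
-- lists at the junction) instead of A's linear stack pass; same asymptotic cost after the sort.
-- Both Pythons sort `intervals` in place (same sort); the equivalence proved is about the return value.

-- ===== PORT A =====
def solve (intervals : List (List Int)) : Int :=
  let ivs := PySem.List.sorted intervals (fun x => PySem.List.pyGetD x 0 0)
  let stack : List (List Int) := [PySem.List.pyGetD ivs 0 []]
  let stack := (PySem.List.pyRange 0 (ivs.length : Int) 1).foldl (fun stack i =>
      let cur := PySem.List.pyGetD ivs i []
      let top := PySem.List.pyGetD stack (-1) ([] : List Int)
      if PySem.List.pyGetD cur 0 0 ≤ PySem.List.pyGetD top 1 0 ∧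
         PySem.List.pyGetD top 1 0 > PySem.List.pyGetD cur 1 0 then stack
      else if PySem.List.pyGetD top 1 0 ≥ PySem.List.pyGetD cur 0 0 then
        stack.dropLast ++ [[PySem.List.pyGetD top 0 0, PySem.List.pyGetD cur 1 0]]
      else stack ++ [cur]) stack
  stack.foldl (fun r x =>
      if PySem.List.pyGetD x 1 0 - PySem.List.pyGetD x 0 0 + 1 > r
      then PySem.List.pyGetD x 1 0 - PySem.List.pyGetD x 0 0 + 1 else r) 0

-- ===== PORT B =====
-- _merge: the while loop over `right` becomes the structural recursion absorbB on the same state (s, e)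
def absorbB (s e : Int) (r : List (Int × Int)) : List (Int × Int) :=
  match r with
  | [] => [(s, e)]
  | (s', e') :: rest => if s' ≤ e then absorbB s (max e e') rest else (s, e) :: (s', e') :: rest

def mergeB (l r : List (Int × Int)) : List (Int × Int) :=
  if l.isEmpty then r
  else l.dropLast ++ absorbB (l.getLastD (0, 0)).1 (l.getLastD (0, 0)).2 r

def spansB (ivs : List (List Int)) : List (Int × Int) :=
  match ivs with
  | [] => []
  | [x] => [(PySem.List.pyGetD x 0 0, PySem.List.pyGetD x 1 0)]
  | a :: b :: t =>
      mergeB (spansB ((a :: b :: t).take ((a :: b :: t).length / 2)))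
             (spansB ((a :: b :: t).drop ((a :: b :: t).length / 2)))
termination_by ivs.length
decreasing_by
  · simp [List.length_take]; omega
  · simp [List.length_drop]; omega

def solve_alt (intervals : List (List Int)) : Int :=
  let ivs := PySem.List.sorted intervals (fun x => PySem.List.pyGetD x 0 0)
  (spansB ivs).foldl (fun best p => max best (p.2 - p.1 + 1)) 0

-- ===== PRECONDITION & SPEC =====
-- Pre_ excludes exactly the inputs where Python A raises IndexError: the empty list
-- (intervals[0]) and lists with a sublist of length < 2 (x[0]/x[1]).
def Pre_solve (intervals : List (List Int)) : Prop :=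
  intervals ≠ [] ∧ ∀ l ∈ intervals, 2 ≤ l.length
instance (intervals : List (List Int)) : Decidable (Pre_solve intervals) := by
  unfold Pre_solve; infer_instance
def pvWitness_solve : List (List Int) := [[1, 3], [2, 5], [9, 9]]
def Spec_solve (intervals : List (List Int)) (out : Int) : Prop := out = solve_alt intervals
instance (intervals : List (List Int)) (out : Int) : Decidable (Spec_solve intervals out) := by unfold Spec_solve; infer_instance

-- ===== CLAIM (what is proved, stated in full; the proofs are below) =====
def Claim_equal_solve : Prop := ∀ (intervals : List (List Int)), Dom_solve intervals → Pre_solve intervals → Spec_solve intervals (solve intervals)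

-- ===== LEMMAS AND PROOFS =====

-- proof-side names (definitionally equal to the lambdas in the ports)
def aStep (stack : List (List Int)) (cur : List Int) : List (List Int) :=
  let top := PySem.List.pyGetD stack (-1) ([] : List Int)
  if PySem.List.pyGetD cur 0 0 ≤ PySem.List.pyGetD top 1 0 ∧
     PySem.List.pyGetD top 1 0 > PySem.List.pyGetD cur 1 0 then stack
  else if PySem.List.pyGetD top 1 0 ≥ PySem.List.pyGetD cur 0 0 then
    stack.dropLast ++ [[PySem.List.pyGetD top 0 0, PySem.List.pyGetD cur 1 0]]
  else stack ++ [cur]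

def mStep (r : Int) (x : List Int) : Int :=
  if PySem.List.pyGetD x 1 0 - PySem.List.pyGetD x 0 0 + 1 > r
  then PySem.List.pyGetD x 1 0 - PySem.List.pyGetD x 0 0 + 1 else r

def mStep' (r : Int) (p : Int × Int) : Int := max r (p.2 - p.1 + 1)

def spanOf (x : List Int) : Int × Int := (PySem.List.pyGetD x 0 0, PySem.List.pyGetD x 1 0)

-- the linear (left-to-right) span computation: reference semantics both ports are reduced to
def goL (s e : Int) : List (List Int) → List (Int × Int)
  | [] => [(s, e)]
  | y :: ys =>
      if PySem.List.pyGetD y 0 0 ≤ e then goL s (max e (PySem.List.pyGetD y 1 0)) ys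
      else (s, e) :: goL (PySem.List.pyGetD y 0 0) (PySem.List.pyGetD y 1 0) ys

def comps : List (List Int) → List (Int × Int)
  | [] => []
  | x :: xs => goL (PySem.List.pyGetD x 0 0) (PySem.List.pyGetD x 1 0) xs

theorem goL_ne_nil (l : List (List Int)) : ∀ s e, goL s e l ≠ [] := by
  induction l with
  | nil => intro s e; simp [goL]
  | cons y ys ih =>
    intro s e
    by_cases h : PySem.List.pyGetD y 0 0 ≤ e <;> simp [goL, h, ih]

theorem absorbB_goL (l : List (List Int)) : ∀ s e s' e',
    absorbB s e (goL s' e' l) =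
      if s' ≤ e then goL s (max e e') l else (s, e) :: goL s' e' l := by
  induction l with
  | nil => intro s e s' e'; simp [goL, absorbB]
  | cons y ys ih =>
    intro s e s' e'
    by_cases hy : PySem.List.pyGetD y 0 0 ≤ e'
    · rw [show goL s' e' (y :: ys) = goL s' (max e' (PySem.List.pyGetD y 1 0)) ys from by
        simp [goL, hy]]
      rw [ih]
      by_cases hs : s' ≤ e
      · have hy2 : PySem.List.pyGetD y 0 0 ≤ max e e' := le_max_of_le_right hy
        simp only [if_pos hs, goL, if_pos hy2, max_assoc]
      · simp [hs]
    · rw [show goL s' e' (y :: ys)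
          = (s', e') :: goL (PySem.List.pyGetD y 0 0) (PySem.List.pyGetD y 1 0) ys from by
        simp [goL, hy]]
      by_cases hs : s' ≤ e
      · rw [show absorbB s e ((s', e') :: goL (PySem.List.pyGetD y 0 0) (PySem.List.pyGetD y 1 0) ys)
            = absorbB s (max e e') (goL (PySem.List.pyGetD y 0 0) (PySem.List.pyGetD y 1 0) ys) from by
          simp [absorbB, hs]]
        rw [ih]
        have : ¬ PySem.List.pyGetD y 0 0 ≤ e' := hy
        by_cases hy3 : PySem.List.pyGetD y 0 0 ≤ max e e'
        · simp [hs, goL, hy3]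
        · simp [hs, goL, hy3]
      · simp [absorbB, hs]

theorem goL_append (ys xs : List (List Int)) : ∀ (s e : Int),
    goL s e (xs ++ ys) =
      (goL s e xs).dropLast ++
        absorbB ((goL s e xs).getLastD (0, 0)).1 ((goL s e xs).getLastD (0, 0)).2 (comps ys) := by
  induction xs with
  | nil =>
    intro s e
    simp only [List.nil_append]
    rw [show goL s e ([] : List (List Int)) = [(s, e)] from by simp [goL]]
    show goL s e ys = [] ++ absorbB s e (comps ys)
    rw [List.nil_append]
    cases ys with
    | nil => simp [comps, absorbB, goL]
    | cons y ys' =>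
      rw [show comps (y :: ys')
          = goL (PySem.List.pyGetD y 0 0) (PySem.List.pyGetD y 1 0) ys' from rfl]
      rw [absorbB_goL]
      by_cases h : PySem.List.pyGetD y 0 0 ≤ e <;> simp [goL, h]
  | cons x xs' ih =>
    intro s e
    by_cases h : PySem.List.pyGetD x 0 0 ≤ e
    · rw [show (x :: xs') ++ ys = x :: (xs' ++ ys) from rfl]
      simp only [goL, if_pos h]
      exact ih s (max e (PySem.List.pyGetD x 1 0))
    · rw [show (x :: xs') ++ ys = x :: (xs' ++ ys) from rfl]
      simp only [goL, if_neg h]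
      rw [ih]
      have hne := goL_ne_nil xs' (PySem.List.pyGetD x 0 0) (PySem.List.pyGetD x 1 0)
      rw [List.dropLast_cons_of_ne_nil hne, List.getLastD_cons]
      rw [show (goL (PySem.List.pyGetD x 0 0) (PySem.List.pyGetD x 1 0) xs').getLastD (s, e)
          = (goL (PySem.List.pyGetD x 0 0) (PySem.List.pyGetD x 1 0) xs').getLastD (0, 0) from by
        cases hG : goL (PySem.List.pyGetD x 0 0) (PySem.List.pyGetD x 1 0) xs' with
        | nil => exact absurd hG hne
        | cons g gs =>
            cases hgl : (g :: gs).getLast? with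
            | none => simp at hgl
            | some a => simp [List.getLastD]]
      simp

theorem comps_append (l1 l2 : List (List Int)) :
    comps (l1 ++ l2) = mergeB (comps l1) (comps l2) := by
  cases l1 with
  | nil => simp [comps, mergeB]
  | cons x xs =>
    rw [show (x :: xs) ++ l2 = x :: (xs ++ l2) from rfl]
    rw [show comps (x :: (xs ++ l2))
        = goL (PySem.List.pyGetD x 0 0) (PySem.List.pyGetD x 1 0) (xs ++ l2) from rfl]
    rw [goL_append]
    rw [show comps (x :: xs)
        = goL (PySem.List.pyGetD x 0 0) (PySem.List.pyGetD x 1 0) xs from rfl]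
    have hne := goL_ne_nil xs (PySem.List.pyGetD x 0 0) (PySem.List.pyGetD x 1 0)
    rw [mergeB, if_neg (by simpa [List.isEmpty_iff] using hne)]

theorem spansB_eq_comps (ivs : List (List Int)) : spansB ivs = comps ivs := by
  induction ivs using spansB.induct with
  | case1 => simp [spansB, comps]
  | case2 x => simp [spansB, comps, goL]
  | case3 a b t ih1 ih2 =>
    rw [spansB, ih1, ih2, ← comps_append, List.take_append_drop]

theorem stack_spans (rest : List (List Int)) : ∀ (P : List (List Int)) (top : List Int),
    (List.foldl aStep (P ++ [top]) rest).map spanOf =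
      P.map spanOf ++ goL (PySem.List.pyGetD top 0 0) (PySem.List.pyGetD top 1 0) rest := by
  induction rest with
  | nil => intro P top; simp [goL, spanOf]
  | cons iv rest ih =>
    intro P top
    simp only [List.foldl_cons]
    by_cases h1 : PySem.List.pyGetD iv 0 0 ≤ PySem.List.pyGetD top 1 0 ∧
        PySem.List.pyGetD top 1 0 > PySem.List.pyGetD iv 1 0
    · rw [show aStep (P ++ [top]) iv = P ++ [top] from by
        simp [aStep, PySem.List.pyGetD_neg_one_append_singleton, h1]]
      rw [show goL (PySem.List.pyGetD top 0 0) (PySem.List.pyGetD top 1 0) (iv :: rest)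
          = goL (PySem.List.pyGetD top 0 0) (PySem.List.pyGetD top 1 0) rest from by
        have hmax : max (PySem.List.pyGetD top 1 0) (PySem.List.pyGetD iv 1 0)
            = PySem.List.pyGetD top 1 0 := max_eq_left (le_of_lt h1.2)
        simp [goL, h1.1, hmax]]
      exact ih P top
    · by_cases h2 : PySem.List.pyGetD top 1 0 ≥ PySem.List.pyGetD iv 0 0
      · have hEe : PySem.List.pyGetD top 1 0 ≤ PySem.List.pyGetD iv 1 0 := by
          rcases not_and_or.mp h1 with hc | hc
          · exact absurd h2 hc
          · omega
        have hlt : ¬ (PySem.List.pyGetD top 1 0 > PySem.List.pyGetD iv 1 0) := not_lt.mpr hEe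
        rw [show aStep (P ++ [top]) iv
            = P ++ [[PySem.List.pyGetD top 0 0, PySem.List.pyGetD iv 1 0]] from by
          simp [aStep, PySem.List.pyGetD_neg_one_append_singleton, hlt, h2]]
        rw [show goL (PySem.List.pyGetD top 0 0) (PySem.List.pyGetD top 1 0) (iv :: rest)
            = goL (PySem.List.pyGetD top 0 0) (PySem.List.pyGetD iv 1 0) rest from by
          simp [goL, h2, max_eq_right hEe]]
        have := ih P [PySem.List.pyGetD top 0 0, PySem.List.pyGetD iv 1 0]
        simpa [PySem.List.pyGetD_zero_cons, PySem.List.pyGetD_ofNat'] using this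
      · rw [show aStep (P ++ [top]) iv = (P ++ [top]) ++ [iv] from by
          simp [aStep, PySem.List.pyGetD_neg_one_append_singleton, h2]]
        rw [show goL (PySem.List.pyGetD top 0 0) (PySem.List.pyGetD top 1 0) (iv :: rest)
            = (PySem.List.pyGetD top 0 0, PySem.List.pyGetD top 1 0)
              :: goL (PySem.List.pyGetD iv 0 0) (PySem.List.pyGetD iv 1 0) rest from by
          simp [goL, h2]]
        rw [ih (P ++ [top]) iv]
        simp [spanOf]

theorem mStep_eq (r : Int) (x : List Int) : mStep r x = mStep' r (spanOf x) := by
  simp only [mStep, mStep', spanOf]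
  omega

theorem foldl_mStep_map (stack : List (List Int)) : ∀ (b : Int),
    stack.foldl mStep b = (stack.map spanOf).foldl mStep' b := by
  induction stack with
  | nil => intro b; rfl
  | cons x xs ih => intro b; simp only [List.foldl_cons, List.map_cons, mStep_eq, ih]

theorem solve_spec : Claim_equal_solve := by
  intro intervals _ hpre
  set L := PySem.List.sorted intervals (fun x => PySem.List.pyGetD x 0 0) with hLdef
  have hA : solve intervals = List.foldl mStep 0
      (List.foldl (fun acc j => aStep acc (PySem.List.pyGetD L j ([] : List Int)))
        [PySem.List.pyGetD L 0 ([] : List Int)] (PySem.List.pyRange 0 (L.length : Int))) := rfl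
  have hB : solve_alt intervals = (spansB L).foldl mStep' 0 := rfl
  rw [PySem.List.foldl_pyRange_zero_pyGetD' L ([] : List Int) aStep] at hA
  have hne : L ≠ [] := by
    intro h0
    have hp := PySem.List.sorted_perm intervals (fun x => PySem.List.pyGetD x 0 0) false
    rw [← hLdef, h0] at hp
    exact hpre.1 hp.symm.eq_nil
  obtain ⟨x0, rest, hl⟩ := List.exists_cons_of_ne_nil hne
  unfold Spec_solve
  rw [hA, hB, hl, spansB_eq_comps]
  rw [show comps (x0 :: rest)
      = goL (PySem.List.pyGetD x0 0 0) (PySem.List.pyGetD x0 1 0) rest from rfl]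
  simp only [PySem.List.pyGetD_zero_cons, List.foldl_cons]
  have htop : PySem.List.pyGetD [x0] (-1) ([] : List Int) = x0 :=
    PySem.List.pyGetD_neg_one_append_singleton [] x0 []
  by_cases hd : PySem.List.pyGetD x0 1 0 ≥ PySem.List.pyGetD x0 0 0
  · rw [show aStep [x0] x0
        = [] ++ [[PySem.List.pyGetD x0 0 0, PySem.List.pyGetD x0 1 0]] from by
      simp [aStep, htop, hd]]
    rw [foldl_mStep_map, stack_spans rest []
      [PySem.List.pyGetD x0 0 0, PySem.List.pyGetD x0 1 0]]
    simp [PySem.List.pyGetD_ofNat']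
  · rw [show aStep [x0] x0 = [x0] ++ [x0] from by simp [aStep, htop, hd]]
    rw [foldl_mStep_map, stack_spans rest [x0] x0]
    simp only [List.map_cons, List.map_nil, List.cons_append, List.nil_append,
      List.foldl_cons]
    rw [show mStep' 0 (spanOf x0) = 0 from by
      simp only [mStep', spanOf]; omega]
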